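-- pv_equiv track=rewrite | github.com/dwanneruchi/538_Riddlers | 2022/20220114/functions.py | nextGuessFrequent
-- ===== SOURCE A (Python) =====
-- from collections import defaultdict, Counter
--
-- def nextGuessFrequent(include_chars, top_chars, guess_words):
--     """Maximize number of frequent chars that are new"""
--     max_dict = defaultdict(set)
--
--     # iterate and find new chars from each guess
--     for guess in guess_words:
--         new_chars = set([c for c in guess]) - include_chars
--         new_top = len([c for c in new_chars if c in top_chars])
--         max_dict[new_top].add(guess)
--
--     # find max
--     max_idx = max(max_dict.keys())
--
--     # return set
--     return max_dict[max_idx]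
-- ===== SOURCE B (Python) =====
-- def nextGuessFrequent(include_chars, top_chars, guess_words):
--     """Maximize number of frequent chars that are new"""
--     # single running-argmax pass: no dict, no score index at all
--     best = None
--     winners = set()
--     for guess in guess_words:
--         score = sum(1 for c in set(guess) if c in top_chars and c not in include_chars)
--         if best is None or score > best:
--             best = score
--             winners = {guess}
--         elif score == best:
--             winners.add(guess)
--     return winners
-- ===== Notes on version B (the rewrite author's own statement) =====
-- stated objective: simpler
-- what changed: Replaces A's score->set-of-guesses index (defaultdict(set) built over all words, then max over its keys and a lookup) with a single running-argmax pass that keeps only the best score seen and the current set of winners, resetting it on a strict improvement; no dict and no post-hoc max exist in B.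
import Mathlib
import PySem

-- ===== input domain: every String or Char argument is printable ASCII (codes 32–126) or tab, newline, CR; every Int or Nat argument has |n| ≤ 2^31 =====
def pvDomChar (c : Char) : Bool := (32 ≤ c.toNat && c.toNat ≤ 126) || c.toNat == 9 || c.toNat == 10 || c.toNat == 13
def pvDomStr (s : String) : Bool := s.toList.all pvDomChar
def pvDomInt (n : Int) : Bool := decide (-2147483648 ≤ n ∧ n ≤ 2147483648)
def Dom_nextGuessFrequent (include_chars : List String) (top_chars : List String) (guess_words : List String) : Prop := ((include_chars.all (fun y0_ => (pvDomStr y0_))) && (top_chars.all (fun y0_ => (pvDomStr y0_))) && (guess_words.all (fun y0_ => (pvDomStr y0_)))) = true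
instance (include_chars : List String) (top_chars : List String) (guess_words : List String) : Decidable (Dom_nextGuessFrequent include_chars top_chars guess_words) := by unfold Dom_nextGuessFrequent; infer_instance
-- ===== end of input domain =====

-- B replaces A's score→set-of-guesses index (defaultdict(set), then max over keys and a lookup)
-- with a single running-argmax pass keeping only the best score and the current winners set
-- (objective: simpler decomposition, same cost).

-- ===== PORT A =====
def nextGuessFrequent (include_chars : List String) (top_chars : List String) (guess_words : List String) : List String :=
  let max_dict : PySem.Dict Int (PySem.Set String) :=
    guess_words.foldl (fun d guess =>
      let new_chars : PySem.Set String :=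
        PySem.Set.diff (PySem.Set.ofList (guess.toList.map (fun c => String.mk [c]))) include_chars
      let new_top : Int := ((new_chars.filter (fun c => top_chars.contains c)).length : Int)
      d.modify new_top PySem.Set.empty (fun s => PySem.Set.add s guess)) PySem.Dict.empty
  match PySem.List.max? max_dict.keys (fun k => k) with
  | some max_idx => max_dict.getD max_idx PySem.Set.empty
  | none => []  -- unreachable under Pre_ (guess_words ≠ []): here Python's max([]) raises ValueError

-- ===== PORT B =====
def nextGuessFrequent_alt (include_chars : List String) (top_chars : List String) (guess_words : List String) : List String :=
  (guess_words.foldl (fun (st : Option Int × PySem.Set String) guess =>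
      let score : Int :=
        (PySem.Set.ofList (guess.toList.map (fun c => String.mk [c]))).foldl
          (fun acc c => if top_chars.contains c && !include_chars.contains c then acc + 1 else acc) 0
      match st.1 with
      | none => (some score, PySem.Set.add PySem.Set.empty guess)
      | some best =>
        if score > best then (some score, PySem.Set.add PySem.Set.empty guess)
        else if score == best then (some best, PySem.Set.add st.2 guess)
        else st)
    ((none : Option Int), (PySem.Set.empty : PySem.Set String))).2

-- ===== PRECONDITION & SPEC =====
-- Pre_ excludes only guess_words = [], where A raises ValueError (max() of an empty sequence).
def Pre_nextGuessFrequent (include_chars : List String) (top_chars : List String) (guess_words : List String) : Prop :=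
  guess_words ≠ []
instance (include_chars : List String) (top_chars : List String) (guess_words : List String) : Decidable (Pre_nextGuessFrequent include_chars top_chars guess_words) := by unfold Pre_nextGuessFrequent; infer_instance

def pvWitness_nextGuessFrequent : List String × List String × List String := (["a"], ["b", "c"], ["ab", "bc", "d"])

def Spec_nextGuessFrequent (include_chars : List String) (top_chars : List String) (guess_words : List String) (out : List String) : Prop := out = nextGuessFrequent_alt include_chars top_chars guess_words
instance (include_chars : List String) (top_chars : List String) (guess_words : List String) (out : List String) : Decidable (Spec_nextGuessFrequent include_chars top_chars guess_words out) := by unfold Spec_nextGuessFrequent; infer_instance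

-- ===== CLAIM (what is proved, stated in full; the proofs are below) =====
def Claim_equal_nextGuessFrequent : Prop := ∀ (include_chars : List String) (top_chars : List String) (guess_words : List String), Dom_nextGuessFrequent include_chars top_chars guess_words → Pre_nextGuessFrequent include_chars top_chars guess_words → Spec_nextGuessFrequent include_chars top_chars guess_words (nextGuessFrequent include_chars top_chars guess_words)
-- ===== LEMMAS AND PROOFS =====

-- A's grouping loop: the bucket of score k collects, as a set, the guesses of score k in order.
theorem pvGroup_getD (f : String → Int) (ws : List String) (d : PySem.Dict Int (PySem.Set String)) (k : Int) :
    (ws.foldl (fun d g => d.modify (f g) PySem.Set.empty (fun s => PySem.Set.add s g)) d).getD k PySem.Set.empty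
      = PySem.Set.update (d.getD k PySem.Set.empty) (ws.filter (fun g => f g == k)) := by
  induction ws generalizing d with
  | nil => rfl
  | cons g t ih =>
    simp only [List.foldl_cons, List.filter_cons, ih, PySem.Dict.getD_modify]
    by_cases h : f g = k
    · simp [h, PySem.Set.update]
    · simp [h, Ne.symm h]

-- max() only depends on the set of elements (Int, no key).
theorem pvMax_congr_mem (l₁ l₂ : List Int) (h : ∀ x, x ∈ l₁ ↔ x ∈ l₂) :
    PySem.List.max? l₁ (fun x => x) = PySem.List.max? l₂ (fun x => x) := by
  cases h₁ : PySem.List.max? l₁ (fun x => x) with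
  | none =>
    have : l₁ = [] := (PySem.List.max?_eq_none_iff _ _).mp h₁
    subst this
    have : l₂ = [] := by
      cases l₂ with
      | nil => rfl
      | cons y t => exact absurd ((h y).mpr (by simp)) (by simp)
    rw [this]
    rfl
  | some m₁ =>
    cases h₂ : PySem.List.max? l₂ (fun x => x) with
    | none =>
      have : l₂ = [] := (PySem.List.max?_eq_none_iff _ _).mp h₂
      subst this
      exact absurd ((h m₁).mp (PySem.List.max?_mem h₁)) (by simp)
    | some m₂ =>
      have hm₁ : m₁ ∈ l₂ := (h m₁).mp (PySem.List.max?_mem h₁)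
      have hm₂ : m₂ ∈ l₁ := (h m₂).mpr (PySem.List.max?_mem h₂)
      have le₁ : m₁ ≤ m₂ := PySem.List.max?_isMax h₂ m₁ hm₁
      have le₂ : m₂ ≤ m₁ := PySem.List.max?_isMax h₁ m₂ hm₂
      simp [le_antisymm le₁ le₂]

-- counting fold = length of the filtered list
theorem pvCount_foldl (p : String → Bool) (l : List String) (a : Int) :
    l.foldl (fun acc c => if p c then acc + 1 else acc) a = a + ((l.filter p).length : Int) := by
  induction l generalizing a with
  | nil => simp
  | cons c t ih =>
    simp only [List.foldl_cons, List.filter_cons]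
    by_cases h : p c = true
    · rw [ih]; simp [h]; omega
    · rw [ih]; simp [h]

-- the per-guess scores of A and B coincide
theorem pvScore_eq (inc top : List String) (g : String) :
    (((PySem.Set.diff (PySem.Set.ofList (g.toList.map (fun c => String.mk [c]))) inc).filter
        (fun c => top.contains c)).length : Int)
      = (PySem.Set.ofList (g.toList.map (fun c => String.mk [c]))).foldl
          (fun acc c => if top.contains c && !inc.contains c then acc + 1 else acc) 0 := by
  rw [pvCount_foldl]
  have hdiff : PySem.Set.diff (PySem.Set.ofList (g.toList.map (fun c => String.mk [c]))) inc
      = (PySem.Set.ofList (g.toList.map (fun c => String.mk [c]))).filter (fun a => !inc.contains a) := rfl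
  rw [hdiff, List.filter_filter]
  simp [Bool.and_comm]

-- b ≤ running max starting at b
theorem pvFoldlMax_ge (f : String → Int) (r : List String) (a : Int) :
    a ≤ r.foldl (fun m g => max m (f g)) a := by
  induction r generalizing a with
  | nil => simp
  | cons x rr ihr => exact le_trans (le_max_left a (f x)) (ihr (max a (f x)))

-- B's running-argmax loop, characterized once the state holds a best score b and winners s:
-- the final best is the running max, and the winners are either s updated by the ties with b
-- (if b survives) or the set of guesses achieving the new maximum.
theorem pvLoopB (f : String → Int) (t : List String) (b : Int) (s : PySem.Set String) :
    t.foldl (fun (st : Option Int × PySem.Set String) g =>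
        match st.1 with
        | none => (some (f g), PySem.Set.add PySem.Set.empty g)
        | some best =>
          if f g > best then (some (f g), PySem.Set.add PySem.Set.empty g)
          else if f g == best then (some best, PySem.Set.add st.2 g)
          else st) (some b, s)
      = (some (t.foldl (fun m g => max m (f g)) b),
         if t.foldl (fun m g => max m (f g)) b = b
         then PySem.Set.update s (t.filter (fun g => f g == b))
         else PySem.Set.ofList (t.filter (fun g => f g == t.foldl (fun m g => max m (f g)) b))) := by
  induction t generalizing b s with
  | nil => simp [PySem.Set.update]
  | cons g r ih =>
    simp only [List.foldl_cons]
    by_cases h1 : f g > b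
    · rw [if_pos h1, ih (f g) (PySem.Set.add PySem.Set.empty g),
        show max b (f g) = f g from max_eq_right (by omega)]
      have hMge : f g ≤ r.foldl (fun m g => max m (f g)) (f g) := pvFoldlMax_ge f r (f g)
      have hMb : ¬ r.foldl (fun m g => max m (f g)) (f g) = b := by omega
      rw [if_neg hMb]
      by_cases h2 : r.foldl (fun m g => max m (f g)) (f g) = f g
      · rw [if_pos h2, h2, List.filter_cons]
        simp only [beq_self_eq_true, if_pos]
        rfl
      · rw [if_neg h2, List.filter_cons]
        have : (f g == r.foldl (fun m g => max m (f g)) (f g)) = false := by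
          simp only [beq_eq_false_iff_ne, ne_eq]
          omega
        rw [this]
        simp
    · rw [if_neg h1, show max b (f g) = b from max_eq_left (by omega)]
      have hMge : b ≤ r.foldl (fun m g => max m (f g)) b := pvFoldlMax_ge f r b
      by_cases h2 : f g = b
      · rw [show (f g == b) = true from by simp [h2], if_pos rfl, ih b (PySem.Set.add s g)]
        by_cases h3 : r.foldl (fun m g => max m (f g)) b = b
        · rw [if_pos h3, if_pos h3, List.filter_cons,
            show (f g == b) = true from by simp [h2]]
          simp only [if_pos]
          rfl
        · rw [if_neg h3, if_neg h3, List.filter_cons]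
          have : (f g == r.foldl (fun m g => max m (f g)) b) = false := by
            simp only [beq_eq_false_iff_ne, ne_eq]
            omega
          rw [this]
          simp
      · rw [show (f g == b) = false from by simp [h2], if_neg (by simp), ih b s]
        by_cases h3 : r.foldl (fun m g => max m (f g)) b = b
        · rw [if_pos h3, if_pos h3, List.filter_cons,
            show (f g == b) = false from by simp [h2]]
          simp
        · rw [if_neg h3, if_neg h3, List.filter_cons]
          have : (f g == r.foldl (fun m g => max m (f g)) b) = false := by
            simp only [beq_eq_false_iff_ne, ne_eq]
            omega
          rw [this]
          simp

-- the whole computation, generic in the score function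
theorem pvMain (f : String → Int) (g : String) (r : List String) :
    (match PySem.List.max? ((g :: r).foldl (fun (d : PySem.Dict Int (PySem.Set String)) w =>
        d.modify (f w) PySem.Set.empty (fun s => PySem.Set.add s w)) PySem.Dict.empty).keys (fun k => k) with
     | some max_idx => ((g :: r).foldl (fun (d : PySem.Dict Int (PySem.Set String)) w =>
        d.modify (f w) PySem.Set.empty (fun s => PySem.Set.add s w)) PySem.Dict.empty).getD max_idx PySem.Set.empty
     | none => ([] : List String)) =
    ((g :: r).foldl (fun (st : Option Int × PySem.Set String) w =>
        match st.1 with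
        | none => (some (f w), PySem.Set.add PySem.Set.empty w)
        | some best =>
          if f w > best then (some (f w), PySem.Set.add PySem.Set.empty w)
          else if f w == best then (some best, PySem.Set.add st.2 w)
          else st) ((none : Option Int), (PySem.Set.empty : PySem.Set String))).2 := by
  have hkeys : ((g :: r).foldl (fun (d : PySem.Dict Int (PySem.Set String)) w =>
      d.modify (f w) PySem.Set.empty (fun s => PySem.Set.add s w)) PySem.Dict.empty).keys
      = PySem.Set.ofList ((g :: r).map f) := by
    rw [PySem.Dict.keys_foldl_modify_key]
    simp [PySem.Set.ofList, PySem.Set.update, PySem.Dict.keys_empty, PySem.Set.empty]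
  have hmaxA : PySem.List.max? ((g :: r).foldl (fun (d : PySem.Dict Int (PySem.Set String)) w =>
      d.modify (f w) PySem.Set.empty (fun s => PySem.Set.add s w)) PySem.Dict.empty).keys (fun k => k)
      = some (r.foldl (fun m w => max m (f w)) (f g)) := by
    rw [hkeys, pvMax_congr_mem _ ((g :: r).map f) (by intro x; simp [PySem.Set.mem_ofList]),
      List.map_cons, PySem.List.max?_id_cons, List.foldl_map]
  -- B's loop computes the set of guesses achieving the maximum
  have hB : ((g :: r).foldl (fun (st : Option Int × PySem.Set String) w =>
        match st.1 with
        | none => (some (f w), PySem.Set.add PySem.Set.empty w)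
        | some best =>
          if f w > best then (some (f w), PySem.Set.add PySem.Set.empty w)
          else if f w == best then (some best, PySem.Set.add st.2 w)
          else st) ((none : Option Int), (PySem.Set.empty : PySem.Set String))).2
      = PySem.Set.ofList ((g :: r).filter (fun w => f w == r.foldl (fun m w => max m (f w)) (f g))) := by
    rw [List.foldl_cons]
    dsimp only
    rw [pvLoopB f r (f g) (PySem.Set.add PySem.Set.empty g)]
    by_cases h2 : r.foldl (fun m w => max m (f w)) (f g) = f g
    · rw [show ((some (r.foldl (fun m w => max m (f w)) (f g)),
          if r.foldl (fun m w => max m (f w)) (f g) = f g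
          then PySem.Set.update (PySem.Set.add PySem.Set.empty g) (r.filter (fun w => f w == f g))
          else PySem.Set.ofList (r.filter (fun w => f w == r.foldl (fun m w => max m (f w)) (f g)))) :
          Option Int × PySem.Set String).2
        = PySem.Set.update (PySem.Set.add PySem.Set.empty g) (r.filter (fun w => f w == f g))
        from by rw [if_pos h2], List.filter_cons, h2]
      simp only [beq_self_eq_true, if_pos]
      rfl
    · rw [show ((some (r.foldl (fun m w => max m (f w)) (f g)),
          if r.foldl (fun m w => max m (f w)) (f g) = f g
          then PySem.Set.update (PySem.Set.add PySem.Set.empty g) (r.filter (fun w => f w == f g))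
          else PySem.Set.ofList (r.filter (fun w => f w == r.foldl (fun m w => max m (f w)) (f g)))) :
          Option Int × PySem.Set String).2
        = PySem.Set.ofList (r.filter (fun w => f w == r.foldl (fun m w => max m (f w)) (f g)))
        from by rw [if_neg h2], List.filter_cons]
      have hge := pvFoldlMax_ge f r (f g)
      have : (f g == r.foldl (fun m w => max m (f w)) (f g)) = false := by
        simp only [beq_eq_false_iff_ne, ne_eq]
        omega
      rw [this]
      simp
  rw [hB, hmaxA]
  show ((g :: r).foldl (fun (d : PySem.Dict Int (PySem.Set String)) w =>
      d.modify (f w) PySem.Set.empty (fun s => PySem.Set.add s w)) PySem.Dict.empty).getD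
      (r.foldl (fun m w => max m (f w)) (f g)) PySem.Set.empty = _
  rw [pvGroup_getD f (g :: r) PySem.Dict.empty (r.foldl (fun m w => max m (f w)) (f g))]
  rfl

-- ===== VERDICT (by name: the statement is the Claim_ definition above) =====
theorem nextGuessFrequent_spec : Claim_equal_nextGuessFrequent := by
  intro include_chars top_chars guess_words _ hpre
  unfold Spec_nextGuessFrequent nextGuessFrequent nextGuessFrequent_alt
  cases guess_words with
  | nil => exact absurd rfl hpre
  | cons g r =>
    have hscore : ∀ w : String,
        (((PySem.Set.diff (PySem.Set.ofList (w.toList.map (fun c => String.mk [c]))) include_chars).filter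
            (fun c => top_chars.contains c)).length : Int)
          = (PySem.Set.ofList (w.toList.map (fun c => String.mk [c]))).foldl
              (fun acc c => if top_chars.contains c && !include_chars.contains c then acc + 1 else acc) 0 :=
      fun w => pvScore_eq include_chars top_chars w
    have h := pvMain (fun w =>
      (((PySem.Set.diff (PySem.Set.ofList (w.toList.map (fun c => String.mk [c]))) include_chars).filter
        (fun c => top_chars.contains c)).length : Int)) g r
    simp only at h ⊢
    rw [h]
    simp only [hscore]
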